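-- pv_equiv track=rewrite | github.com/MinMolang/codePractice | Programmers/PRETEST3.py | solution
-- ===== SOURCE A (Python) =====
-- def solution(a):
--     zeropattern = 0
--     onepattern = 0
--     # 홀수인덱스 체크
--     # zeropattern 시작패턴이면 0이 있어야한다.  0이 아니면 증가
--     # onepattern이면 1이 있어야한다. 1이 아니면 증가
--     for t in a[::2]:
--         if t == 0:
--             onepattern+=1
--         else:
--             zeropattern+=1
--     # 짝수인덱스 체크
--     # 0 1 0 1 0 1 검사
--     # 1 0 1 0 1 0  검사
--     # zeropattern 시작패턴이면 1이 있어야한다.  1이 아니면 증가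
--     # onepattern이면 0이 있어야한다. 0이 아니면 증가
--     for t in a[1::2]:
--         if t == 0:
--             zeropattern += 1
--         else:
--             onepattern += 1
--     answer = min(zeropattern,onepattern)
--     return answer
-- ===== SOURCE B (Python) =====
-- def solution(a):
--     # Right-to-left DP over suffixes with swapping accumulators: for the current
--     # suffix, nz = edits needed if its first element should be nonzero, zz = edits
--     # if it should be zero; prepending an element swaps the roles of the tail costs.
--     nz, zz = 0, 0
--     for x in reversed(a):
--         nz, zz = (x == 0) + zz, (x != 0) + nz
--     return min(nz, zz)
-- ===== Notes on version B (the rewrite author's own statement) =====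
-- stated objective: alternative
-- what changed: B is a suffix dynamic program: one right-to-left pass with two swapping accumulators (cost of the suffix for each of the two alternating patterns, where prepending an element swaps the tail's costs), instead of A's two stride-slice passes each updating its own mismatch counters by index parity.
import Mathlib
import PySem

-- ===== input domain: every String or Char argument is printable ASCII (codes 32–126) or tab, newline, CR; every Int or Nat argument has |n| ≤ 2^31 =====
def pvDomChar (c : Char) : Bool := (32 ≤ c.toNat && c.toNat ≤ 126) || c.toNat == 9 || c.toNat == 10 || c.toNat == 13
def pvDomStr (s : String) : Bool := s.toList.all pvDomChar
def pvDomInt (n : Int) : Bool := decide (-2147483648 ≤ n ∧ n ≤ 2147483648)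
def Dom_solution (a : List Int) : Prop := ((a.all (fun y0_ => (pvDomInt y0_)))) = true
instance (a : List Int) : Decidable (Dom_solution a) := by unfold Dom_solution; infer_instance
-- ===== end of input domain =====

-- B is a suffix dynamic program: one right-to-left pass with two swapping accumulators,
-- instead of A's two stride-slice passes with parity-fixed counters (objective: alternative).

-- ===== PORT A =====
def solution (a : List Int) : Int :=
  let ev := (PySem.List.slice? a none none 2).getD []
  let od := (PySem.List.slice? a (some 1) none 2).getD []
  let p := ev.foldl (fun (p : Int × Int) t => if t = 0 then (p.1, p.2 + 1) else (p.1 + 1, p.2)) (0, 0)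
  let q := od.foldl (fun (p : Int × Int) t => if t = 0 then (p.1 + 1, p.2) else (p.1, p.2 + 1)) p
  min q.1 q.2

-- ===== PORT B =====
def solution_alt (a : List Int) : Int :=
  let p := a.reverse.foldl
    (fun (s : Int × Int) x => ((if x = 0 then 1 else 0) + s.2, (if x ≠ 0 then 1 else 0) + s.1))
    (0, 0)
  min p.1 p.2

-- ===== PRECONDITION & SPEC =====
def Spec_solution (a : List Int) (out : Int) : Prop := out = solution_alt a
instance (a : List Int) (out : Int) : Decidable (Spec_solution a out) := by unfold Spec_solution; infer_instance

-- ===== CLAIM (what is proved, stated in full; the proofs are below) =====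
def Claim_equal_solution : Prop := ∀ (a : List Int), Dom_solution a → Spec_solution a (solution a)

-- ===== LEMMAS AND PROOFS =====

-- every other element starting at index 0 (the value of a[::2])
def evens : List Int → List Int
  | [] => []
  | [x] => [x]
  | x :: _ :: xs => x :: evens xs

-- "t is nonzero" / "t is zero" as stable Bool predicates
def pnz (t : Int) : Bool := !(t == 0)
def pz (t : Int) : Bool := t == 0

theorem evens_cons_tail (y : Int) (xs : List Int) :
    evens (y :: xs) = y :: evens xs.tail := by
  cases xs <;> simp [evens]

theorem filterMap_even (a : List Int) :
    List.filterMap (fun k => a[2*k]?) (List.range ((a.length+1)/2)) = evens a := by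
  induction a using evens.induct with
  | case1 => simp [evens]
  | case2 x => simp [evens, List.range_succ]
  | case3 x y xs ih =>
    have hc : ((x :: y :: xs).length + 1) / 2 = (xs.length + 1) / 2 + 1 := by
      simp only [List.length_cons]; omega
    rw [hc, List.range_succ_eq_map, List.filterMap_cons, List.filterMap_map]
    have hf : ∀ k : Nat, (x :: y :: xs)[2 * (k+1)]? = xs[2*k]? := by
      intro k
      have h2 : 2 * (k+1) = 2*k + 1 + 1 := by omega
      simp [h2]
    simp only [Function.comp_def, Nat.succ_eq_add_one, hf, ih]
    simp [evens]

theorem filterMap_odd (a : List Int) :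
    List.filterMap (fun k => a[1+2*k]?) (List.range (a.length/2)) = evens a.tail := by
  induction a using evens.induct with
  | case1 => simp [evens]
  | case2 x => simp [evens]
  | case3 x y xs ih =>
    have hc : (x :: y :: xs).length / 2 = xs.length / 2 + 1 := by
      simp only [List.length_cons]; omega
    rw [hc, List.range_succ_eq_map, List.filterMap_cons, List.filterMap_map]
    have hf : ∀ k : Nat, (x :: y :: xs)[1 + 2 * (k+1)]? = xs[1+2*k]? := by
      intro k
      have h2 : 1 + 2 * (k+1) = (1 + 2*k) + 1 + 1 := by omega
      simp [h2]
    simp only [Function.comp_def, Nat.succ_eq_add_one, hf, ih]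
    cases xs <;> simp [evens]

theorem slice2_even (a : List Int) :
    PySem.List.slice? a none none 2 = some (evens a) := by
  rw [← filterMap_even]
  simp only [PySem.List.slice?, PySem.List.sliceIndices]
  norm_num
  have hc : (if 0 < a.length then (((a.length : Int) + 2 - 1) / 2).toNat else 0) = (a.length+1)/2 := by
    split <;> omega
  rw [hc]
  apply List.filterMap_congr
  intro k _
  have h : ((2 : Int) * (k : Int)).toNat = 2 * k := by omega
  rw [h]

theorem slice2_odd (a : List Int) :
    PySem.List.slice? a (some 1) none 2 = some (evens a.tail) := by
  rw [← filterMap_odd]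
  cases a with
  | nil => decide
  | cons x xs =>
    simp only [PySem.List.slice?, PySem.List.sliceIndices]
    norm_num
    have hc : (if 0 < xs.length then (((xs.length : Int) + 2 - 1) / 2).toNat else 0) = (xs.length+1)/2 := by
      split <;> omega
    rw [hc]
    apply List.filterMap_congr
    intro k _
    have h : ((1 : Int) + 2 * (k : Int)).toNat = 1 + 2 * k := by omega
    rw [h]

theorem foldl_ev (l : List Int) (z o : Int) :
    l.foldl (fun (p : Int × Int) t => if t = 0 then (p.1, p.2 + 1) else (p.1 + 1, p.2)) (z, o)
      = (z + l.countP pnz, o + l.countP pz) := by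
  induction l generalizing z o with
  | nil => simp
  | cons x xs ih =>
    by_cases hx : x = 0 <;>
      simp only [List.foldl_cons, hx, if_pos, ih, List.countP_cons, pnz, pz] <;>
      simp [hx] <;> ring_nf

theorem foldl_od (l : List Int) (z o : Int) :
    l.foldl (fun (p : Int × Int) t => if t = 0 then (p.1 + 1, p.2) else (p.1, p.2 + 1)) (z, o)
      = (z + l.countP pz, o + l.countP pnz) := by
  induction l generalizing z o with
  | nil => simp
  | cons x xs ih =>
    by_cases hx : x = 0 <;>
      simp only [List.foldl_cons, hx, if_pos, ih, List.countP_cons, pnz, pz] <;>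
      simp [hx] <;> ring_nf

-- B's right-to-left pass computes, for the whole list, the two pattern costs
-- (first component: pattern expecting nonzero at index 0; second: expecting zero)
theorem foldl_reverse_dp (a : List Int) :
    a.reverse.foldl
      (fun (s : Int × Int) x => ((if x = 0 then 1 else 0) + s.2, (if x ≠ 0 then 1 else 0) + s.1))
      (0, 0)
      = (((evens a).countP pz : Int) + (evens a.tail).countP pnz,
         ((evens a).countP pnz : Int) + (evens a.tail).countP pz) := by
  rw [List.foldl_reverse]
  induction a with
  | nil => simp [evens]
  | cons x xs ih =>
    rw [List.foldr_cons, ih, evens_cons_tail, List.tail_cons, List.countP_cons, List.countP_cons]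
    by_cases hx : x = 0
    · simp only [pz, pnz, hx, Prod.mk.injEq]
      push_cast
      constructor <;> simp <;> ring
    · simp only [pz, pnz, hx, Prod.mk.injEq]
      push_cast
      constructor <;> simp [hx] <;> ring

-- ===== VERDICT (by name: the statement is the Claim_ definition above) =====
theorem solution_spec : Claim_equal_solution := by
  intro a _
  show solution a = solution_alt a
  rw [solution, solution_alt]
  simp only [slice2_even, slice2_odd, Option.getD_some, foldl_ev, foldl_od, foldl_reverse_dp,
    zero_add]
  push_cast
  omega
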